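-- pv_equiv track=rewrite | github.com/alakmazaheri/GeneFinder | gene_finder.py | rest_of_ORF
-- ===== SOURCE A (Python) =====
-- def rest_of_ORF(dna):
--     """ Takes a DNA sequence that is assumed to begin with a start
--         codon and returns the sequence up to but not including the
--         first in frame stop codon.  If there is no in frame stop codon,
--         returns the whole string. Added test case of stop codon being
--         out of frame. Also, make sure the stop codon is not nested
--         in either the start or another stop codon.
--
--         dna: a DNA sequence
--         returns: the open reading frame represented as a string
--     >>> rest_of_ORF("ATGTGAA")
--     'ATG'
--     >>> rest_of_ORF("ATGAGATAGG")
--     'ATGAGA'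
--     >>> rest_of_ORF("ATGCATGAATGTAGATAGATGTGCCC")
--     'ATGCATGAATGTAGA'
--     >>> rest_of_ORF("ATGATG")
--     'ATGATG'
--     >>> rest_of_ORF("ATG")
--     'ATG'
--     >>> rest_of_ORF("ATGATAA")
--     'ATGATAA'
--     """
--     stop_codons = ['TAG', 'TAA', 'TGA'];
--
--     # GOAL: find the first stop codon in frame
--     dna_tail = dna[3:];      # look at dna string after start codon
--     contains_stop = False;                              # assume no stop codon until you find one
--
--     stop_idxs = [];
--     for c in stop_codons:                               # check for each type of stop codon
--         if c in dna_tail:                               # if this type shows up in the rest of the string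
--             numinstances = dna_tail.count(c);           # well, make sure you account for each time the codon shows up
--             prev_idx = 0;                               # start looking for it at 0
--             for i in range(numinstances):               # for each instance...
--                 idx = dna_tail.find(c, prev_idx)        # find the start point
--                 if (idx % 3 == 0):                      # make sure it is in frame
--                     stop_idxs.append(idx);              # if it is, save the index as a place of a valid stop codon
--                     contains_stop = True;               # make sure we stop somewhere
--                 prev_idx = idx + 3;                     # when looking for other instances of the codon, look past here!
--                                                             # when you look for other types of stop codon, you should start back at 0
--     # If there is no stop codon, return the full string
--     if(contains_stop == False):
--         return dna;
--
--     # But, if there was a stop codon, return up to/not including it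
--     first_stop =  3 + min(stop_idxs); # idx w.r.t dna, not dna_tail
--     return dna[0:first_stop]
-- ===== SOURCE B (Python) =====
-- def rest_of_ORF(dna):
--     for i in range(3, len(dna), 3):
--         if dna[i:i+3] in ('TAG', 'TAA', 'TGA'):
--             return dna[:i]
--     return dna
-- ===== Notes on version B (the rewrite author's own statement) =====
-- stated objective: simpler
-- what changed: A scans the tail once per stop-codon type with count/find bookkeeping, collects all in-frame hit indices and takes their minimum; B is a single ordered in-frame scan over range(3, len(dna), 3) that returns at the first stop codon.
import Mathlib
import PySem

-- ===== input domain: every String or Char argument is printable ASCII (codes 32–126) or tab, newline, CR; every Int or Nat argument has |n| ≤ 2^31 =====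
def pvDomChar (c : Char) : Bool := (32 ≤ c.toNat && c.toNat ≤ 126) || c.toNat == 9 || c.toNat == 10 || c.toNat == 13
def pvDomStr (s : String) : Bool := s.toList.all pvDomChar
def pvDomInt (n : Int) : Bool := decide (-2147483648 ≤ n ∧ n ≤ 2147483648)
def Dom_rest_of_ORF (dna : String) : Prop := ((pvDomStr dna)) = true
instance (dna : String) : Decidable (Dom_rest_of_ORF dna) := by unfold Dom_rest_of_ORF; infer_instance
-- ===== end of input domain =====

-- B replaces A's per-codon count/find scanning plus a final min with one in-frame scan that
-- returns at the first stop codon (objective: simpler single pass; same return value everywhere).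

-- ===== PORT A =====

def pvStopCodons : List String := ["TAG", "TAA", "TGA"]

-- inner loop: 'for i in range(numinstances)' over state (stop_idxs, contains_stop, prev_idx)
def pvFindLoop (dna_tail c : String) : Nat → (List Int × Bool × Int) → (List Int × Bool × Int)
  | 0, st => st
  | Nat.succ n, (stop_idxs, contains_stop, prev_idx) =>
      let idx := PySem.Str.findFrom dna_tail c prev_idx
      if PySem.Int.mod idx 3 = 0 then
        pvFindLoop dna_tail c n (stop_idxs ++ [idx], true, idx + 3)
      else
        pvFindLoop dna_tail c n (stop_idxs, contains_stop, idx + 3)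

-- outer loop body: 'for c in stop_codons'
def pvCodonStep (dna_tail : String) (st : List Int × Bool) (c : String) : List Int × Bool :=
  if PySem.Str.isIn c dna_tail then
    let numinstances := PySem.Str.count dna_tail c
    let r := pvFindLoop dna_tail c numinstances (st.1, st.2, 0)
    (r.1, r.2.1)
  else st

def rest_of_ORF (dna : String) : String :=
  let dna_tail := PySem.Str.slice dna (some 3) none
  let r := pvStopCodons.foldl (pvCodonStep dna_tail) ([], false)
  if r.2 = false then dna
  else
    let first_stop : Int := 3 + (PySem.List.min? r.1 (fun x => x)).getD 0
    PySem.Str.slice dna (some 0) (some first_stop)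

-- ===== PORT B =====
def pvScanB (dna : String) : List Int → String
  | [] => dna
  | i :: rest =>
      if PySem.Str.slice dna (some i) (some (i + 3)) ∈ ["TAG", "TAA", "TGA"] then
        PySem.Str.slice dna none (some i)
      else pvScanB dna rest

def rest_of_ORF_alt (dna : String) : String :=
  pvScanB dna (PySem.List.pyRange 3 (PySem.Str.len dna) 3)


-- ===== PRECONDITION & SPEC =====
def Spec_rest_of_ORF (dna : String) (out : String) : Prop := out = rest_of_ORF_alt dna
instance (dna : String) (out : String) : Decidable (Spec_rest_of_ORF dna out) := by unfold Spec_rest_of_ORF; infer_instance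

-- ===== CLAIM (what is proved, stated in full; the proofs are below) =====
def Claim_equal_rest_of_ORF : Prop := ∀ (dna : String), Dom_rest_of_ORF dna → Spec_rest_of_ORF dna (rest_of_ORF dna)

-- ===== LEMMAS AND PROOFS =====

def pvCnt (c : List Char) : List Char → Nat
  | [] => 0
  | x :: u => if c.isPrefixOf (x :: u) then pvCnt c (u.drop (c.length - 1)) + 1 else pvCnt c u
  termination_by l => l.length
  decreasing_by all_goals (simp only [List.length_cons, List.length_drop]; omega)

theorem pvCnt_go (c : List Char) (hc : c ≠ []) (fuel : Nat) (l : List Char) (acc : Nat)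
    (h : l.length ≤ fuel) : PySem.Chars.count.go c fuel l acc = acc + pvCnt c l := by
  induction fuel generalizing l acc with
  | zero =>
    have : l = [] := by cases l <;> simp_all
    subst this; simp [PySem.Chars.count.go, pvCnt]
  | succ n ih =>
    cases l with
    | nil => simp [PySem.Chars.count.go, pvCnt]
    | cons x u =>
      rw [PySem.Chars.count.go]
      by_cases hp : c.isPrefixOf (x :: u)
      · rw [if_pos hp, pvCnt, if_pos hp]
        cases c with
        | nil => exact absurd rfl hc
        | cons y cs =>
          rw [List.length_cons, List.drop_succ_cons, ih]
          · simp only [Nat.add_sub_cancel]; omega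
          · have := List.length_drop (l := u) (i := cs.length)
            simp at h ⊢; omega
      · rw [if_neg hp, pvCnt, if_neg hp, ih]
        simp at h; omega

theorem count_eq_pvCnt (t c : List Char) (hc : c ≠ []) :
    PySem.Chars.count t c = pvCnt c t := by
  rw [PySem.Chars.count, if_neg (by simpa using hc), pvCnt_go c hc _ t 0 le_rfl]
  exact Nat.zero_add _

theorem pvCnt_zero_iff (c : List Char) (hc : c ≠ []) (u : List Char) :
    pvCnt c u = 0 ↔ ∀ j, ¬ c <+: u.drop j := by
  induction u with
  | nil =>
    simpa [pvCnt] using hc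
  | cons x u ih =>
    rw [pvCnt]
    by_cases hp : c.isPrefixOf (x :: u)
    · rw [if_pos hp]
      simp only [Nat.succ_ne_zero, false_iff, not_forall]
      exact ⟨0, by simpa using List.isPrefixOf_iff_prefix.mp hp⟩
    · rw [if_neg hp, ih]
      constructor
      · intro h j
        cases j with
        | zero => simpa using fun hh => hp (List.isPrefixOf_iff_prefix.mpr hh)
        | succ j => simpa [List.drop_succ_cons] using h j
      · intro h j
        simpa [List.drop_succ_cons] using h (j + 1)

theorem pvCnt_first (c : List Char) (hc3 : c.length = 3) (u : List Char) (p : Nat)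
    (hp : c <+: u.drop p) (hmin : ∀ q < p, ¬ c <+: u.drop q) :
    pvCnt c u = pvCnt c (u.drop (p + 3)) + 1 := by
  induction p generalizing u with
  | zero =>
    simp only [List.drop_zero] at hp
    cases u with
    | nil => exact absurd (List.prefix_nil.mp hp) (by intro h; rw [h] at hc3; simp at hc3)
    | cons x u =>
      rw [pvCnt, if_pos (List.isPrefixOf_iff_prefix.mpr hp), hc3]
      rfl
  | succ p ihp =>
    have h0 : ¬ c <+: u := by simpa using hmin 0 (Nat.succ_pos p)
    cases u with
    | nil =>
      simp only [List.drop_nil] at hp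
      exact absurd (List.prefix_nil.mp hp) (by intro h; rw [h] at hc3; simp at hc3)
    | cons x u =>
      rw [pvCnt, if_neg (fun hh => h0 (List.isPrefixOf_iff_prefix.mp hh))]
      have := ihp u (by simpa [List.drop_succ_cons] using hp)
        (fun q hq => by simpa [List.drop_succ_cons] using hmin (q + 1) (by omega))
      simpa [List.drop_succ_cons] using this

theorem pvNoOverlap (x y z : Char) (h1 : x ≠ y) (h2 : x ≠ z) (u : List Char)
    (h : [x, y, z] <+: u) : ¬ [x, y, z] <+: u.drop 1 ∧ ¬ [x, y, z] <+: u.drop 2 := by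
  obtain ⟨v, rfl⟩ := h
  constructor
  · rintro ⟨w, hw⟩
    simp at hw
    exact h1 hw.1
  · rintro ⟨w, hw⟩
    simp at hw
    exact h2 hw.1

def pvFirst (p : Nat → Bool) : Nat → Nat → Option Nat
  | _, 0 => none
  | k, n + 1 => if p k then some k else pvFirst p (k + 1) n

theorem pvFirst_some {p : Nat → Bool} {k n m : Nat} (h : pvFirst p k n = some m) :
    k ≤ m ∧ m < k + n ∧ p m = true ∧ ∀ j, k ≤ j → j < m → p j = false := by
  induction n generalizing k with
  | zero => simp [pvFirst] at h
  | succ n ih =>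
    rw [pvFirst] at h
    by_cases hk : p k
    · rw [if_pos hk] at h
      obtain rfl : k = m := by simpa using h
      exact ⟨le_rfl, by omega, hk, fun j h1 h2 => by omega⟩
    · rw [if_neg hk] at h
      obtain ⟨h1, h2, h3, h4⟩ := ih h
      refine ⟨by omega, by omega, h3, fun j hj1 hj2 => ?_⟩
      rcases Nat.eq_or_lt_of_le hj1 with rfl | hlt
      · exact Bool.eq_false_iff.mpr hk
      · exact h4 j hlt hj2

theorem pvFirst_eq_some {p : Nat → Bool} {k n m : Nat} (hm : k ≤ m) (hlt : m < k + n)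
    (hpm : p m = true) (hmin : ∀ j, k ≤ j → j < m → p j = false) :
    pvFirst p k n = some m := by
  induction n generalizing k with
  | zero => omega
  | succ n ih =>
    rw [pvFirst]
    rcases Nat.eq_or_lt_of_le hm with rfl | hlt'
    · rw [if_pos hpm]
    · rw [if_neg (by simp [hmin k le_rfl hlt'])]
      exact ih (by omega) (by omega) (fun j h1 h2 => hmin j (by omega) h2)
theorem pv_mod3_cast (m : Nat) : PySem.Int.mod (m : Int) 3 = ((m % 3 : Nat) : Int) := by
  exact_mod_cast PySem.Int.mod_natCast m 3

theorem pvFindLoop_spec (dna_tail c : String) (hc3 : c.toList.length = 3)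
    (hov : ∀ u : List Char, c.toList <+: u → ¬ c.toList <+: u.drop 1 ∧ ¬ c.toList <+: u.drop 2) :
    ∀ (n k : Nat) (idxs : List Int) (flag : Bool),
    k ≤ dna_tail.toList.length →
    pvCnt c.toList (dna_tail.toList.drop k) = n →
    ∃ (L : List Int) (prev' : Int),
      pvFindLoop dna_tail c n (idxs, flag, (k : Int)) = (idxs ++ L, flag || !L.isEmpty, prev') ∧
      (∀ j ∈ L, ∃ m : Nat, j = (m : Int) ∧ k ≤ m ∧ m % 3 = 0 ∧ c.toList <+: dna_tail.toList.drop m) ∧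
      (∀ m : Nat, k ≤ m → m % 3 = 0 → c.toList <+: dna_tail.toList.drop m → (m : Int) ∈ L) := by
  have hcne : c.toList ≠ [] := by intro h; rw [h] at hc3; simp at hc3
  intro n
  induction n with
  | zero =>
    intro k idxs flag hk hcnt
    refine ⟨[], (k : Int), by simp [pvFindLoop], by simp, ?_⟩
    intro m hkm _ hocc
    have h0 := (pvCnt_zero_iff c.toList hcne (dna_tail.toList.drop k)).mp hcnt (m - k)
    rw [List.drop_drop, Nat.add_sub_cancel' hkm] at h0
    exact (h0 hocc).elim
  | succ n ih =>
    intro k idxs flag hk hcnt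
    set t := dna_tail.toList with ht
    -- existence of an occurrence at or after k
    have hex : ∃ j : Nat, c.toList <+: t.drop (k + j) := by
      by_contra hno
      push Not at hno
      have : pvCnt c.toList (t.drop k) = 0 := by
        rw [pvCnt_zero_iff c.toList hcne]
        intro j
        rw [List.drop_drop]
        exact hno j
      omega
    have hQ : DecidablePred fun j : Nat => c.toList <+: t.drop (k + j) := fun j => inferInstance
    let j0 := @Nat.find _ hQ hex
    set m0 : Nat := k + j0 with hm0def
    have hocc0 : c.toList <+: t.drop m0 := @Nat.find_spec _ hQ hex
    have hmin0 : ∀ i : Nat, k ≤ i → i < m0 → ¬ c.toList <+: t.drop i := by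
      intro i hki hilt hocc
      exact @Nat.find_min _ hQ hex (i - k) (by omega) (by rwa [Nat.add_sub_cancel' hki])
    -- the find call returns m0
    have hfind : PySem.Chars.findFrom t c.toList (k : Int) = (m0 : Int) := by
      have hne : PySem.Chars.findFrom t c.toList (k : Int) ≠ -1 := by
        rw [Ne, PySem.Chars.findFrom_natCast_eq_neg_one_iff t c.toList k hk]
        push Not
        have hsfx : (t.drop k).drop j0 <:+ t.drop k := List.drop_suffix _ _
        have : c.toList <+: (t.drop k).drop j0 := by rwa [List.drop_drop]
        exact this.isInfix.trans hsfx.isInfix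
      obtain ⟨h1, h2, h3⟩ := PySem.Chars.findFrom_natCast_spec t c.toList k hk hne
      have hr0 : 0 ≤ PySem.Chars.findFrom t c.toList (k : Int) := le_trans (by positivity) h1
      set r := PySem.Chars.findFrom t c.toList (k : Int) with hr
      have hkr : k ≤ r.toNat := by omega
      have hge : m0 ≤ r.toNat := by
        by_contra hlt
        exact hmin0 r.toNat hkr (by omega) h2
      have hle : ¬ m0 < r.toNat := fun hlt => h3 m0 (by omega) hlt hocc0
      have : r.toNat = m0 := by omega
      omega
    have hlen : m0 + 3 ≤ t.length := by
      have := hocc0.length_le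
      rw [List.length_drop, hc3] at this
      omega
    have hcnt' : pvCnt c.toList (t.drop (m0 + 3)) = n := by
      have := pvCnt_first c.toList hc3 (t.drop k) j0
        (by rwa [List.drop_drop])
        (by intro q hq; rw [List.drop_drop]; exact hmin0 (k + q) (by omega) (by omega))
      rw [List.drop_drop] at this
      have harith : k + (j0 + 3) = m0 + 3 := by omega
      rw [harith] at this
      omega
    have hnoov := hov (t.drop m0) hocc0
    rw [List.drop_drop, List.drop_drop] at hnoov
    by_cases hm : m0 % 3 = 0
    · obtain ⟨L', prev', heq, hsound, hcomp⟩ := ih (m0 + 3) (idxs ++ [(m0 : Int)]) true (by omega) hcnt'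
      refine ⟨(m0 : Int) :: L', prev', ?_, ?_, ?_⟩
      · rw [pvFindLoop]
        simp only [PySem.Str.findFrom_eq, ← ht, hfind, pv_mod3_cast, hm]
        rw [if_pos (by simp)]
        have : ((m0 : Int) + 3) = ((m0 + 3 : Nat) : Int) := by push_cast; ring
        rw [this, heq]
        simp
      · intro j hj
        rcases List.mem_cons.mp hj with rfl | hj'
        · exact ⟨m0, rfl, by omega, hm, hocc0⟩
        · obtain ⟨m, rfl, hm1, hm2, hm3⟩ := hsound j hj'
          exact ⟨m, rfl, by omega, hm2, hm3⟩
      · intro m hkm hm3 hocc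
        by_cases hcase : m < m0 + 3
        · have hge : m0 ≤ m := by
            by_contra hlt
            exact hmin0 m hkm (by omega) hocc
          have : m = m0 := by
            rcases Nat.lt_or_ge m (m0 + 1) with h | h
            · omega
            · rcases Nat.lt_or_ge m (m0 + 2) with h' | h'
              · exact absurd (by rwa [show m = m0 + 1 by omega] at hocc) hnoov.1
              · exact absurd (by rwa [show m = m0 + 2 by omega] at hocc) hnoov.2
          simp [this]
        · exact List.mem_cons_of_mem _ (hcomp m (by omega) hm3 hocc)
    · obtain ⟨L', prev', heq, hsound, hcomp⟩ := ih (m0 + 3) idxs flag (by omega) hcnt'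
      refine ⟨L', prev', ?_, ?_, ?_⟩
      · rw [pvFindLoop]
        simp only [PySem.Str.findFrom_eq, ← ht, hfind, pv_mod3_cast]
        rw [if_neg (fun h => hm (by exact_mod_cast h))]
        have : ((m0 : Int) + 3) = ((m0 + 3 : Nat) : Int) := by push_cast; ring
        rw [this, heq]
      · intro j hj
        obtain ⟨m, rfl, hm1, hm2, hm3⟩ := hsound j hj
        exact ⟨m, rfl, by omega, hm2, hm3⟩
      · intro m hkm hm3 hocc
        have hge : m0 ≤ m := by
          by_contra hlt
          exact hmin0 m hkm (by omega) hocc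
        have hne : m ≠ m0 := fun h => hm (h ▸ hm3)
        have hge3 : m0 + 3 ≤ m := by
          rcases Nat.lt_or_ge m (m0 + 2) with h | h
          · exact absurd (by rwa [show m = m0 + 1 by omega] at hocc) hnoov.1
          · rcases Nat.lt_or_ge m (m0 + 3) with h' | h'
            · exact absurd (by rwa [show m = m0 + 2 by omega] at hocc) hnoov.2
            · omega
        exact hcomp m hge3 hm3 hocc

def pvStops : List (List Char) := [['T','A','G'], ['T','A','A'], ['T','G','A']]

def pvIsStop (u : List Char) : Bool := pvStops.any (fun cs => cs.isPrefixOf u)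

def pvGood (s : List Char) (i : Nat) : Bool :=
  decide (3 ≤ i) && decide (i % 3 = 0) && pvIsStop (s.drop i)

theorem pvIsStop_iff (u : List Char) :
    pvIsStop u = true ↔ ∃ cs ∈ pvStops, cs <+: u := by
  simp [pvIsStop, List.any_eq_true, List.isPrefixOf_iff_prefix]

theorem pvOcc_infix {c : List Char} {t : List Char} {m : Nat} (h : c <+: t.drop m) :
    c <:+: t := h.isInfix.trans (List.drop_suffix m t).isInfix

theorem pvCodonStep_spec (dna_tail c : String) (hc3 : c.toList.length = 3)
    (hov : ∀ u : List Char, c.toList <+: u → ¬ c.toList <+: u.drop 1 ∧ ¬ c.toList <+: u.drop 2)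
    (st : List Int × Bool) :
    ∃ L : List Int,
      pvCodonStep dna_tail st c = (st.1 ++ L, st.2 || !L.isEmpty) ∧
      (∀ j ∈ L, ∃ m : Nat, j = (m : Int) ∧ m % 3 = 0 ∧ c.toList <+: dna_tail.toList.drop m) ∧
      (∀ m : Nat, m % 3 = 0 → c.toList <+: dna_tail.toList.drop m → (m : Int) ∈ L) := by
  have hcne : c.toList ≠ [] := by intro h; rw [h] at hc3; simp at hc3
  by_cases hin : PySem.Str.isIn c dna_tail
  · have hcnt : pvCnt c.toList (dna_tail.toList.drop 0) = PySem.Str.count dna_tail c := by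
      rw [List.drop_zero, PySem.Str.count_eq, count_eq_pvCnt _ _ hcne]
    obtain ⟨L, prev', heq, hsound, hcomp⟩ :=
      pvFindLoop_spec dna_tail c hc3 hov (PySem.Str.count dna_tail c) 0 st.1 st.2
        (Nat.zero_le _) hcnt
    refine ⟨L, ?_, ?_, ?_⟩
    · rw [pvCodonStep, if_pos hin]
      rw [show ((0 : Nat) : Int) = (0 : Int) from rfl] at heq
      show ((pvFindLoop dna_tail c (PySem.Str.count dna_tail c) (st.1, st.2, 0)).1,
            (pvFindLoop dna_tail c (PySem.Str.count dna_tail c) (st.1, st.2, 0)).2.1) =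
           (st.1 ++ L, st.2 || !L.isEmpty)
      rw [heq]
    · intro j hj
      obtain ⟨m, rfl, _, hm2, hm3⟩ := hsound j hj
      exact ⟨m, rfl, hm2, hm3⟩
    · intro m hm3 hocc
      exact hcomp m (Nat.zero_le _) hm3 hocc
  · refine ⟨[], ?_, by simp, ?_⟩
    · rw [pvCodonStep, if_neg hin]; simp
    · intro m _ hocc
      have : PySem.Chars.isIn c.toList dna_tail.toList = false := by
        rw [← PySem.Str.isIn_eq]; simpa using hin
      rw [PySem.Chars.isIn_eq_false_iff] at this
      exact absurd (pvOcc_infix hocc) this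

theorem pvOuter_spec (dna_tail : String) :
    ∃ L : List Int,
      pvStopCodons.foldl (pvCodonStep dna_tail) ([], false) = (L, !L.isEmpty) ∧
      (∀ j ∈ L, ∃ m : Nat, j = (m : Int) ∧ m % 3 = 0 ∧ pvIsStop (dna_tail.toList.drop m) = true) ∧
      (∀ m : Nat, m % 3 = 0 → pvIsStop (dna_tail.toList.drop m) = true → (m : Int) ∈ L) := by
  have hTAG : ("TAG" : String).toList = ['T','A','G'] := rfl
  have hTAA : ("TAA" : String).toList = ['T','A','A'] := rfl
  have hTGA : ("TGA" : String).toList = ['T','G','A'] := rfl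
  have hovTAG : ∀ u : List Char, ("TAG" : String).toList <+: u →
      ¬ ("TAG" : String).toList <+: u.drop 1 ∧ ¬ ("TAG" : String).toList <+: u.drop 2 := by
    rw [hTAG]; exact fun u h => pvNoOverlap 'T' 'A' 'G' (by decide) (by decide) u h
  have hovTAA : ∀ u : List Char, ("TAA" : String).toList <+: u →
      ¬ ("TAA" : String).toList <+: u.drop 1 ∧ ¬ ("TAA" : String).toList <+: u.drop 2 := by
    rw [hTAA]; exact fun u h => pvNoOverlap 'T' 'A' 'A' (by decide) (by decide) u h
  have hovTGA : ∀ u : List Char, ("TGA" : String).toList <+: u →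
      ¬ ("TGA" : String).toList <+: u.drop 1 ∧ ¬ ("TGA" : String).toList <+: u.drop 2 := by
    rw [hTGA]; exact fun u h => pvNoOverlap 'T' 'G' 'A' (by decide) (by decide) u h
  obtain ⟨L1, h1, s1, c1⟩ := pvCodonStep_spec dna_tail "TAG" rfl hovTAG ([], false)
  obtain ⟨L2, h2, s2, c2⟩ := pvCodonStep_spec dna_tail "TAA" rfl hovTAA ([] ++ L1, false || !L1.isEmpty)
  obtain ⟨L3, h3, s3, c3⟩ := pvCodonStep_spec dna_tail "TGA" rfl hovTGA
    (([] ++ L1) ++ L2, (false || !L1.isEmpty) || !L2.isEmpty)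
  refine ⟨L1 ++ L2 ++ L3, ?_, ?_, ?_⟩
  · simp only [pvStopCodons, List.foldl_cons, List.foldl_nil]
    rw [h1, h2, h3]
    simp only [List.nil_append, List.append_assoc]
    congr 1
    have hA : ∀ (a b : List Int), (a ++ b).isEmpty = (a.isEmpty && b.isEmpty) := by
      intro a b; cases a <;> simp
    rw [hA, hA]
    cases L1.isEmpty <;> cases L2.isEmpty <;> cases L3.isEmpty <;> rfl
  · intro j hj
    rcases List.mem_append.mp hj with hj' | hj3
    · rcases List.mem_append.mp hj' with hj1 | hj2
      · obtain ⟨m, rfl, hm2, hm3⟩ := s1 j hj1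
        exact ⟨m, rfl, hm2, (pvIsStop_iff _).mpr ⟨['T','A','G'], by decide, by rwa [hTAG] at hm3⟩⟩
      · obtain ⟨m, rfl, hm2, hm3⟩ := s2 j hj2
        exact ⟨m, rfl, hm2, (pvIsStop_iff _).mpr ⟨['T','A','A'], by decide, by rwa [hTAA] at hm3⟩⟩
    · obtain ⟨m, rfl, hm2, hm3⟩ := s3 j hj3
      exact ⟨m, rfl, hm2, (pvIsStop_iff _).mpr ⟨['T','G','A'], by decide, by rwa [hTGA] at hm3⟩⟩
  · intro m hm3 hstop
    obtain ⟨cs, hcs, hocc⟩ := (pvIsStop_iff _).mp hstop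
    simp only [pvStops, List.mem_cons, List.not_mem_nil, or_false] at hcs
    rcases hcs with rfl | rfl | rfl
    · exact List.mem_append.mpr (Or.inl (List.mem_append.mpr (Or.inl
        (c1 m hm3 (by rw [hTAG]; exact hocc)))))
    · exact List.mem_append.mpr (Or.inl (List.mem_append.mpr (Or.inr
        (c2 m hm3 (by rw [hTAA]; exact hocc)))))
    · exact List.mem_append.mpr (Or.inr (c3 m hm3 (by rw [hTGA]; exact hocc)))

theorem pvRange3_nil (a b : Int) (h : b ≤ a) : PySem.List.pyRange a b 3 = [] := by
  rw [PySem.List.pyRange_of_pos a b (by norm_num), if_neg (by omega)]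
  simp

theorem pvRange3_cons (a b : Int) (h : a < b) :
    PySem.List.pyRange a b 3 = a :: PySem.List.pyRange (a + 3) b 3 := by
  rw [PySem.List.pyRange_of_pos a b (by norm_num),
      PySem.List.pyRange_of_pos (a + 3) b (by norm_num), if_pos h]
  by_cases h3 : a + 3 < b
  · rw [if_pos h3]
    rw [show ((b - a + 3 - 1) / 3).toNat = ((b - (a + 3) + 3 - 1) / 3).toNat + 1 by omega]
    rw [List.range_succ_eq_map, List.map_cons, List.map_map]
    congr 1
    · simp
    · refine List.map_congr_left fun k _ => ?_
      simp only [Function.comp_apply]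
      push_cast
      ring
  · rw [if_neg h3]
    rw [show ((b - a + 3 - 1) / 3).toNat = 1 by omega]
    simp

theorem pvSlice0 (dna : String) (b : Int) (hb : 0 ≤ b) :
    PySem.Str.slice dna (some 0) (some b) = PySem.Str.slice dna none (some b) := by
  apply String.toList_inj.mp
  rw [PySem.Str.toList_slice, PySem.Str.toList_slice, PySem.Chars.slice_eq_listSlice,
      PySem.Chars.slice_eq_listSlice, PySem.List.slice_to _ hb,
      show (0 : Int) = ((0 : Nat) : Int) from rfl,
      show b = ((b.toNat : Nat) : Int) from (Int.toNat_of_nonneg hb).symm,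
      PySem.List.slice_natCast]
  simp
  omega

theorem pvStop_cond (dna : String) (k : Nat) :
    (PySem.Str.slice dna (some (k : Int)) (some ((k : Int) + 3)) ∈ (["TAG", "TAA", "TGA"] : List String)) ↔
      pvIsStop (dna.toList.drop k) = true := by
  have hsl : (PySem.Str.slice dna (some (k : Int)) (some ((k : Int) + 3))).toList =
      (dna.toList.drop k).take 3 := by
    rw [PySem.Str.toList_slice, PySem.Chars.slice_eq_listSlice,
        show ((k : Int) + 3) = ((k + 3 : Nat) : Int) by push_cast; ring,
        PySem.List.slice_natCast]
    congr 1
    omega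
  simp only [List.mem_cons, List.not_mem_nil, or_false]
  rw [← String.toList_inj, ← String.toList_inj, ← String.toList_inj, hsl]
  rw [pvIsStop, pvStops]
  simp only [List.any_cons, List.any_nil, Bool.or_eq_true, Bool.or_false,
    List.isPrefixOf_iff_prefix, List.prefix_iff_eq_take]
  constructor
  · rintro (h | h | h) <;> simp_all
  · rintro (h | h | h) <;> simp_all

theorem pvGood_iff (s : List Char) (i : Nat) :
    pvGood s i = true ↔ 3 ≤ i ∧ i % 3 = 0 ∧ pvIsStop (s.drop i) = true := by
  simp [pvGood, and_assoc]

theorem pvFirst_skip3 {p : Nat → Bool} {k n : Nat} (h0 : p k = false)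
    (h1 : p (k + 1) = false) (h2 : p (k + 2) = false) :
    pvFirst p k n = pvFirst p (k + 3) (n - 3) := by
  match n with
  | 0 => rfl
  | 1 => simp [pvFirst, h0]
  | 2 => simp [pvFirst, h0, h1]
  | (n + 3) =>
    show pvFirst p k (n + 3) = pvFirst p (k + 3) n
    rw [pvFirst, if_neg (by simp [h0]), pvFirst, if_neg (by simp [h1]),
        pvFirst, if_neg (by simp [h2])]

-- A equals the canonical first-in-frame-stop form
theorem pvA_model (dna : String) :
    rest_of_ORF dna =
      match pvFirst (pvGood dna.toList) 3 (dna.toList.length - 3) with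
      | some i => PySem.Str.slice dna none (some (i : Int))
      | none => dna := by
  set s := dna.toList with hs
  have htail : (PySem.Str.slice dna (some 3) none).toList = s.drop 3 := by
    rw [PySem.Str.toList_slice, PySem.Chars.slice_eq_listSlice,
        PySem.List.slice_from _ (by norm_num : (0:Int) ≤ 3)]
    rfl
  obtain ⟨L, hfold, hsound, hcomp⟩ := pvOuter_spec (PySem.Str.slice dna (some 3) none)
  rw [htail] at hsound hcomp
  have hdropdrop : ∀ m : Nat, (s.drop 3).drop m = s.drop (m + 3) := by
    intro m; rw [List.drop_drop, Nat.add_comm]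
  simp only [rest_of_ORF]
  rw [hfold]
  cases hL : L with
  | nil =>
    subst hL
    rw [if_pos (by simp)]
    have hnone : pvFirst (pvGood s) 3 (s.length - 3) = none := by
      cases hf : pvFirst (pvGood s) 3 (s.length - 3) with
      | none => rfl
      | some i =>
        obtain ⟨hi1, _, hi3, _⟩ := pvFirst_some hf
        obtain ⟨h3i, hmod, hstop⟩ := (pvGood_iff s i).mp hi3
        have := hcomp (i - 3) (by omega) (by rw [hdropdrop, Nat.sub_add_cancel h3i]; exact hstop)
        simp at this
    rw [hnone]
  | cons j0 L' =>
    rw [if_neg (by subst hL; simp)]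
    have hmem : (PySem.List.min? L (fun x => x)).isSome := by
      rw [hL]
      cases hm : PySem.List.min? (j0 :: L') (fun x => x) with
      | none => exact absurd ((PySem.List.min?_eq_none_iff _ _).mp hm) (by simp)
      | some m => rfl
    obtain ⟨jm, hjm⟩ := Option.isSome_iff_exists.mp hmem
    have hjmem : jm ∈ L := PySem.List.min?_mem hjm
    have hjmin : ∀ y ∈ L, jm ≤ y := by
      intro y hy
      exact PySem.List.min?_isMin hjm y hy
    obtain ⟨m', rfl, hm'3, hm'stop⟩ := hsound jm hjmem
    have hm'len : m' + 3 ≤ s.length - 3 := by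
      obtain ⟨cs, hcs, hocc⟩ := (pvIsStop_iff _).mp hm'stop
      have hlen3 : cs.length = 3 := by
        simp only [pvStops, List.mem_cons, List.not_mem_nil, or_false] at hcs
        rcases hcs with rfl | rfl | rfl <;> rfl
      have := hocc.length_le
      rw [List.length_drop, List.length_drop, hlen3] at this
      omega
    have hfirst : pvFirst (pvGood s) 3 (s.length - 3) = some (m' + 3) := by
      apply pvFirst_eq_some (by omega) (by omega)
      · rw [pvGood_iff]
        exact ⟨by omega, by omega, by rwa [← hdropdrop]⟩
      · intro j hj1 hj2
        by_contra hgj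
        rw [Bool.not_eq_false, pvGood_iff] at hgj
        obtain ⟨h3j, hmodj, hstopj⟩ := hgj
        have := hcomp (j - 3) (by omega) (by rw [hdropdrop, Nat.sub_add_cancel h3j]; exact hstopj)
        have hle := hjmin _ this
        have : (j - 3 : Nat) < m' := by omega
        exact absurd hle (by omega)
    rw [hfirst]
    rw [show ((j0 :: L', !(j0 :: L').isEmpty).1 : List Int) = L from hL.symm]
    rw [hjm]
    simp only [Option.getD_some]
    rw [show (3 + (m' : Int)) = ((m' + 3 : Nat) : Int) by push_cast; ring]
    exact pvSlice0 dna _ (by positivity)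

theorem pvB_go (dna : String) (fuel : Nat) : ∀ (k : Nat),
    dna.toList.length - k ≤ fuel → 3 ≤ k → k % 3 = 0 →
    pvScanB dna (PySem.List.pyRange (k : Int) ((dna.toList.length : Nat) : Int) 3) =
      match pvFirst (pvGood dna.toList) k (dna.toList.length - k) with
      | some i => PySem.Str.slice dna none (some (i : Int))
      | none => dna := by
  induction fuel with
  | zero =>
    intro k hfuel h3 hmod
    have hk : dna.toList.length ≤ k := by omega
    rw [pvRange3_nil _ _ (by exact_mod_cast hk)]
    rw [show dna.toList.length - k = 0 by omega]
    rfl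
  | succ fuel ih =>
    intro k hfuel h3 hmod
    set s := dna.toList with hs
    by_cases hk : k < s.length
    · rw [pvRange3_cons _ _ (by exact_mod_cast hk), pvScanB]
      obtain ⟨n, hn⟩ : ∃ n, s.length - k = n + 1 := ⟨s.length - k - 1, by omega⟩
      by_cases hstop : pvIsStop (s.drop k) = true
      · rw [if_pos ((pvStop_cond dna k).mpr hstop)]
        have hgk : pvGood s k = true := (pvGood_iff s k).mpr ⟨h3, hmod, hstop⟩
        rw [hn, pvFirst, if_pos hgk]
      · rw [if_neg (fun hc => hstop ((pvStop_cond dna k).mp hc))]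
        have hgk : pvGood s k = false := by
          simp [pvGood, hstop]
        have hm1 : (k + 1) % 3 ≠ 0 := by omega
        have hm2 : (k + 2) % 3 ≠ 0 := by omega
        have hg1 : pvGood s (k + 1) = false := by simp [pvGood, hm1]
        have hg2 : pvGood s (k + 2) = false := by simp [pvGood, hm2]
        rw [show ((k : Int) + 3) = ((k + 3 : Nat) : Int) by push_cast; ring]
        rw [ih (k + 3) (by omega) (by omega) (by omega)]
        rw [pvFirst_skip3 hgk hg1 hg2]
        rw [show s.length - k - 3 = s.length - (k + 3) by omega]
    · rw [pvRange3_nil _ _ (by exact_mod_cast Nat.le_of_not_lt hk)]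
      rw [show s.length - k = 0 by omega]
      rfl

set_option maxHeartbeats 1000000 in
theorem pv_main (dna : String) : rest_of_ORF dna = rest_of_ORF_alt dna := by
  rw [pvA_model, rest_of_ORF_alt, PySem.Str.len_eq]
  have h := pvB_go dna dna.toList.length 3 (by omega) (by omega) (by omega)
  rw [show ((3 : Nat) : Int) = (3 : Int) from rfl] at h
  rw [h]

-- ===== VERDICT (by name: the statement is the Claim_ definition above) =====
theorem rest_of_ORF_spec : Claim_equal_rest_of_ORF := by
  intro dna _
  unfold Spec_rest_of_ORF
  exact pv_main dna
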